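-- pv_equiv track=rewrite | github.com/coli-saar/genplan-strategy-refine | agents/agent_code_gen_basic.py | remove_example_calls
-- ===== SOURCE A (Python) =====
-- from typing import List, Dict, Tuple, Union
--
-- def remove_example_calls(generated_code: str) -> Tuple[str, str]:
--     """
--     Remove any call to the get_plan function and everything following a potential call of the function
--     :param generated_code:
--     :return:
--     """
--     code_lines = generated_code.split('\n')
--     found_function = False
--
--     cleaned_code_lines = []
--
--     for line in code_lines:
--         if "def generate_solution" in line:
--             found_function = True
--         if line.startswith('def generate_solution(') and line.strip().endswith(')'):
--             break
--
--         cleaned_code_lines.append(line)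
--
--     cleaned_code = '\n'.join(cleaned_code_lines)
--     if not found_function:
--         return cleaned_code, 'function-not-generated'
--     else:
--         return cleaned_code, ''
-- ===== SOURCE B (Python) =====
-- def remove_example_calls(generated_code: str):
--     """Same result as A: cut at the first complete generate_solution header line
--     and flag whether the function name was seen; computed as two independent passes
--     plus a slice, instead of A's single loop with flag + accumulator + break."""
--     lines = generated_code.split('\n')
--     status = '' if any('def generate_solution' in line for line in lines) else 'function-not-generated'
--     cut = next((i for i, line in enumerate(lines)
--                 if line.startswith('def generate_solution(') and line.strip().endswith(')')),
--                len(lines))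
--     return '\n'.join(lines[:cut]), status
-- ===== Notes on version B (the rewrite author's own statement) =====
-- stated objective: simpler
-- what changed: A's single loop threading a found-flag and an accumulator with a break is replaced by independent passes: an any() membership scan over the lines for the status, a findIdx-style search for the first complete function-header line as the cut point, and a join of the slice lines[:cut].
import Mathlib
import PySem

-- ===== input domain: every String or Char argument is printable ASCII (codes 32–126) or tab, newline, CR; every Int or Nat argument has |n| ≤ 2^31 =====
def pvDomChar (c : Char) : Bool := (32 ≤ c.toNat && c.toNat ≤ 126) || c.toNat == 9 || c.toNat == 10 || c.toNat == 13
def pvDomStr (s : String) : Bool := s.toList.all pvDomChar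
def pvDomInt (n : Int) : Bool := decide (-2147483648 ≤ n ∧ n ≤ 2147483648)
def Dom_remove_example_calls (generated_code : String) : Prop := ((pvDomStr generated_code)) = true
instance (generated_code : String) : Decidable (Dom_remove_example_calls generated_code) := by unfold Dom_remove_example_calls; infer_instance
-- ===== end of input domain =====

-- B replaces A's single loop (flag + accumulator + break) by a membership scan for the
-- status plus a separate cut-index search and slice; objective: simpler decomposition.

-- shared primitive: generated_code.split('\n') (sep is the non-empty literal "\n", so split? is some)
def pvSplitNL (s : String) : List String := (PySem.Str.split? s "\n").getD []

-- ===== PORT A =====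
-- the loop: state (found, cleaned_code_lines); break returns early
def pvLoopA : List String → Bool → List String → List String × Bool
  | [], found, acc => (acc, found)
  | l :: rest, found, acc =>
    let found' := found || PySem.Str.isIn "def generate_solution" l
    if PySem.Str.startswith l "def generate_solution(" &&
       PySem.Str.endswith (PySem.Str.strip l) ")" then (acc, found')
    else pvLoopA rest found' (acc ++ [l])

def remove_example_calls (generated_code : String) : String × String :=
  let code_lines := pvSplitNL generated_code
  let res := pvLoopA code_lines false []
  let cleaned_code := PySem.Str.join "\n" res.1
  if !res.2 then (cleaned_code, "function-not-generated") else (cleaned_code, "")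

-- ===== PORT B =====
def pvBreakLine (l : String) : Bool :=
  PySem.Str.startswith l "def generate_solution(" && PySem.Str.endswith (PySem.Str.strip l) ")"

def remove_example_calls_alt (generated_code : String) : String × String :=
  let lines := pvSplitNL generated_code
  let status := if lines.any (fun l => PySem.Str.isIn "def generate_solution" l)
                then "" else "function-not-generated"
  let cut := lines.findIdx pvBreakLine   -- next(..., len(lines)): List.findIdx is length when absent
  (PySem.Str.join "\n" (lines.take cut), status)

-- ===== PRECONDITION & SPEC =====
def Spec_remove_example_calls (generated_code : String) (out : String × String) : Prop := out = remove_example_calls_alt generated_code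
instance (generated_code : String) (out : String × String) : Decidable (Spec_remove_example_calls generated_code out) := by unfold Spec_remove_example_calls; infer_instance

-- ===== CLAIM (what is proved, stated in full; the proofs are below) =====
def Claim_equal_remove_example_calls : Prop := ∀ (generated_code : String), Dom_remove_example_calls generated_code → Spec_remove_example_calls generated_code (remove_example_calls generated_code)

-- ===== LEMMAS AND PROOFS =====

-- a break line starts with "def generate_solution(", hence contains "def generate_solution"
lemma pvBreak_contains (l : String) (h : pvBreakLine l = true) :
    PySem.Str.isIn "def generate_solution" l = true := by
  unfold pvBreakLine at h
  rw [Bool.and_eq_true] at h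
  have hp := (PySem.Chars.startswith_iff _ _).mp (by simpa using h.1)
  rw [PySem.Str.isIn_iff_infix]
  have : ("def generate_solution".toList) <+: ("def generate_solution(".toList) := by decide
  exact (this.trans hp).isInfix

lemma pvLoopA_spec : ∀ (lines : List String) (found : Bool) (acc : List String),
    pvLoopA lines found acc =
      (acc ++ lines.take (lines.findIdx pvBreakLine),
       found || lines.any (fun l => PySem.Str.isIn "def generate_solution" l)) := by
  intro lines
  induction lines with
  | nil => intro found acc; simp [pvLoopA]
  | cons l rest ih =>
    intro found acc
    have hcond : (PySem.Str.startswith l "def generate_solution(" &&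
        PySem.Str.endswith (PySem.Str.strip l) ")") = pvBreakLine l := rfl
    rw [List.findIdx_cons]
    cases hb : pvBreakLine l with
    | true =>
      have hc := pvBreak_contains l hb
      simp only [pvLoopA, hcond, hb, cond_true, if_true, List.take_zero, List.append_nil,
        List.any_cons, hc, Bool.true_or, Bool.or_true]
    | false =>
      simp only [pvLoopA, hcond, hb, cond_false, Bool.false_eq_true, if_false, ih,
        List.take_succ_cons, List.any_cons, Bool.or_assoc, List.append_assoc,
        List.cons_append, List.nil_append]

-- ===== VERDICT (by name: the statement is the Claim_ definition above) =====
theorem remove_example_calls_spec : Claim_equal_remove_example_calls := by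
  intro gc _
  unfold Spec_remove_example_calls remove_example_calls remove_example_calls_alt
  simp only [pvLoopA_spec, Bool.false_or, List.nil_append]
  cases h : (pvSplitNL gc).any (fun l => PySem.Str.isIn "def generate_solution" l) with
  | false => simp only [Bool.not_false, if_true, Bool.false_eq_true, if_false]
  | true => simp only [Bool.not_true, Bool.false_eq_true, if_false, if_true]
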